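-- pv_equiv track=rewrite | github.com/MAGLeb/current_practice | algorithms_yandex/fifthSprint/secondWeek/O.py | solution
-- ===== SOURCE A (Python) =====
-- def solution(matrix, n, m):
--   totalResult = 0
--
--   for i in range(1, n+1):
--     for j in range(1, m+1):
--       if matrix[i][j] == 1:
--         if matrix[i-1][j] == 0:
--           totalResult += 1
--         if matrix[i][j-1] == 0:
--           totalResult += 1
--         if matrix[i+1][j] == 0:
--           totalResult += 1
--         if matrix[i][j+1] == 0:
--           totalResult += 1
--
--   return totalResult
-- ===== SOURCE B (Python) =====
-- def solution(matrix, n, m):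
--     if n < 1 or m < 1:
--         return 0
--     ones = sum(row[1:m+1].count(1) for row in matrix[1:n+1])
--     blocked = 0
--     for i in range(n + 2):
--         for j in range(m + 2):
--             if matrix[i][j] != 0:
--                 for di, dj in ((-1, 0), (1, 0), (0, -1), (0, 1)):
--                     a, b = i + di, j + dj
--                     if 1 <= a <= n and 1 <= b <= m and matrix[a][b] == 1:
--                         blocked += 1
--     return 4 * ones - blocked
-- ===== Notes on version B (the rewrite author's own statement) =====
-- stated objective: alternative
-- what changed: Replaces A's per-cell four-direction zero-neighbour perimeter test by a count-and-subtract scheme: one pass counts interior 1-cells via slice/count, a second pass over the whole padded grid counts, from each NONZERO cell, its interior 1-neighbours (the dual of the incidence relation), and the result is 4*ones - blocked.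
-- outside the precondition, e.g. on solution([[0, 0], [0, 2, 9], [0]], 1, 1): A returns 0, B raises IndexError; on solution([[0, 0], [0, 0], [0, 0]], 1, 1): A returns 0, B raises IndexError
import Mathlib
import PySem

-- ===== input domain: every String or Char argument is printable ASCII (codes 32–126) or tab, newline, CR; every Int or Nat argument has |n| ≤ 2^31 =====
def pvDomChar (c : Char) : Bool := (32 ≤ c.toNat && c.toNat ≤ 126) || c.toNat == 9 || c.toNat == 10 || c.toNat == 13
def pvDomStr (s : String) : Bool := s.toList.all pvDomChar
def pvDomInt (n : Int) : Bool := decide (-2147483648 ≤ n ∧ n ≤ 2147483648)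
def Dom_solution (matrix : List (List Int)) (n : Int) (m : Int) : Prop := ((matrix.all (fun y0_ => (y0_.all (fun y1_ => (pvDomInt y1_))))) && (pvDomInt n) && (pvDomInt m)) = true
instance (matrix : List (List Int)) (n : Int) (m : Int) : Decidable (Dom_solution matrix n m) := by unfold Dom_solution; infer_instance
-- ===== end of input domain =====

-- B replaces A's per-cell four-direction zero-neighbour test by count-and-subtract:
-- count interior 1-cells, count blocked incidences from each NONZERO padded cell
-- towards its interior 1-neighbours, return 4*ones - blocked (objective: alternative).

-- ===== PORT A =====
-- matrix[i][j] (both indices nonnegative wherever A reads; default unreached under Pre_)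
def pvGet2 (matrix : List (List Int)) (i j : Int) : Int :=
  PySem.List.pyGetD (PySem.List.pyGetD matrix i []) j 0

def solution (matrix : List (List Int)) (n : Int) (m : Int) : Int :=
  (PySem.List.pyRange 1 (n+1) 1).foldl (fun tot i =>
    (PySem.List.pyRange 1 (m+1) 1).foldl (fun tot j =>
      if pvGet2 matrix i j = 1 then
        let tot := if pvGet2 matrix (i-1) j = 0 then tot + 1 else tot
        let tot := if pvGet2 matrix i (j-1) = 0 then tot + 1 else tot
        let tot := if pvGet2 matrix (i+1) j = 0 then tot + 1 else tot
        if pvGet2 matrix i (j+1) = 0 then tot + 1 else tot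
      else tot) tot) 0

-- ===== PORT B =====
def solution_alt (matrix : List (List Int)) (n : Int) (m : Int) : Int :=
  if n < 1 ∨ m < 1 then 0
  else
    4 * ((PySem.List.slice matrix (some 1) (some (n+1))).map
          (fun row => ((PySem.List.count (PySem.List.slice row (some 1) (some (m+1))) (1:Int) : ℕ) : Int))).sum
      - (PySem.List.pyRange 0 (n+2) 1).foldl (fun acc i =>
          (PySem.List.pyRange 0 (m+2) 1).foldl (fun acc j =>
            if pvGet2 matrix i j ≠ 0 then
              ([((-1:Int),(0:Int)),(1,0),(0,-1),(0,1)]).foldl (fun acc p =>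
                if 1 ≤ i + p.1 ∧ i + p.1 ≤ n ∧ 1 ≤ j + p.2 ∧ j + p.2 ≤ m ∧ pvGet2 matrix (i+p.1) (j+p.2) = 1
                then acc + 1 else acc) acc
            else acc) acc) 0

-- ===== PRECONDITION & SPEC =====
-- Pre_ excludes the inputs where A raises IndexError (grid smaller than the padded
-- (n+2)×(m+2) shape the task assumes); it is slightly narrower than A's exact return
-- domain: it also excludes ragged matrices on which A happens to return only because
-- every cell it reads in a too-short row is not 1 (B raises IndexError there).
def Pre_solution (matrix : List (List Int)) (n : Int) (m : Int) : Prop :=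
  n < 1 ∨ m < 1 ∨
    (n + 2 ≤ (matrix.length : Int) ∧
      ∀ row ∈ matrix.take (n+2).toNat, m + 2 ≤ (row.length : Int))
instance (matrix : List (List Int)) (n : Int) (m : Int) : Decidable (Pre_solution matrix n m) := by
  unfold Pre_solution; infer_instance

def pvWitness_solution : List (List Int) × Int × Int := ([[0,0,0],[0,1,0],[0,0,0]], 1, 1)

def Spec_solution (matrix : List (List Int)) (n : Int) (m : Int) (out : Int) : Prop := out = solution_alt matrix n m
instance (matrix : List (List Int)) (n : Int) (m : Int) (out : Int) : Decidable (Spec_solution matrix n m out) := by unfold Spec_solution; infer_instance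

-- ===== CLAIM (what is proved, stated in full; the proofs are below) =====
def Claim_equal_solution : Prop := ∀ (matrix : List (List Int)) (n : Int) (m : Int), Dom_solution matrix n m → Pre_solution matrix n m → Spec_solution matrix n m (solution matrix n m)

-- ===== LEMMAS AND PROOFS =====

-- the contribution of one interior cell, as a single number
def pvCell (u l c r d : Int) : Int :=
  if c = 1 then
    (if u = 0 then 1 else 0) + (if l = 0 then 1 else 0)
      + (if d = 0 then 1 else 0) + (if r = 0 then 1 else 0)
  else 0

-- common normal form of both programs: sum of cell contributions over the interior
def pvSum (matrix : List (List Int)) (N M : Nat) : Int :=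
  ((List.range N).map (fun ki => ((List.range M).map (fun kj =>
     pvCell ((matrix.getD ki []).getD (1+kj) 0) ((matrix.getD (1+ki) []).getD kj 0)
            ((matrix.getD (1+ki) []).getD (1+kj) 0) ((matrix.getD (1+ki) []).getD (2+kj) 0)
            ((matrix.getD (2+ki) []).getD (1+kj) 0))).sum)).sum

-- Nat-indexed padded read
def pvG (matrix : List (List Int)) (a b : Nat) : Int := (matrix.getD a []).getD b 0

def pvGet2_cast (matrix : List (List Int)) (i j : Int) (hi : 0 ≤ i) (hj : 0 ≤ j) :
    pvGet2 matrix i j = (matrix.getD i.toNat []).getD j.toNat 0 := by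
  unfold pvGet2
  rw [PySem.List.pyGetD_of_nonneg matrix ([] : List Int) hi, PySem.List.pyGetD_of_nonneg _ (0:Int) hj]

-- A's loop body is an addition of pvCell
theorem stepA_eq (matrix : List (List Int)) (i j tot : Int) :
    (if pvGet2 matrix i j = 1 then
        let t1 := if pvGet2 matrix (i-1) j = 0 then tot + 1 else tot
        let t2 := if pvGet2 matrix i (j-1) = 0 then t1 + 1 else t1
        let t3 := if pvGet2 matrix (i+1) j = 0 then t2 + 1 else t2
        if pvGet2 matrix i (j+1) = 0 then t3 + 1 else t3
      else tot)
    = tot + pvCell (pvGet2 matrix (i-1) j) (pvGet2 matrix i (j-1)) (pvGet2 matrix i j)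
              (pvGet2 matrix i (j+1)) (pvGet2 matrix (i+1) j) := by
  unfold pvCell; split_ifs <;> ring

theorem A_eq (matrix : List (List Int)) (n m : Int) :
    solution matrix n m = pvSum matrix n.toNat m.toNat := by
  unfold solution pvSum
  have hinner : ∀ (tot : Int) (i : Int), 1 ≤ i →
      (PySem.List.pyRange 1 (m+1) 1).foldl (fun tot j =>
        if pvGet2 matrix i j = 1 then
          let tot := if pvGet2 matrix (i-1) j = 0 then tot + 1 else tot
          let tot := if pvGet2 matrix i (j-1) = 0 then tot + 1 else tot
          let tot := if pvGet2 matrix (i+1) j = 0 then tot + 1 else tot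
          if pvGet2 matrix i (j+1) = 0 then tot + 1 else tot
        else tot) tot
      = tot + ((List.range m.toNat).map (fun kj =>
          pvCell ((matrix.getD (i.toNat - 1) []).getD (1+kj) 0) ((matrix.getD i.toNat []).getD kj 0)
                 ((matrix.getD i.toNat []).getD (1+kj) 0) ((matrix.getD i.toNat []).getD (2+kj) 0)
                 ((matrix.getD (i.toNat + 1) []).getD (1+kj) 0))).sum := by
    intro tot i hi
    rw [PySem.List.pyRange_one 1 (m+1), show m+1-1 = m from by ring, List.foldl_map]
    rw [PySem.List.foldl_congr_mem _ _
      (fun (acc : Int) (kj : Nat) => acc +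
        pvCell ((matrix.getD (i.toNat - 1) []).getD (1+kj) 0) ((matrix.getD i.toNat []).getD kj 0)
               ((matrix.getD i.toNat []).getD (1+kj) 0) ((matrix.getD i.toNat []).getD (2+kj) 0)
               ((matrix.getD (i.toNat + 1) []).getD (1+kj) 0)) tot ?_]
    · exact PySem.List.foldl_add _ _ tot
    · intro acc kj _
      simp only
      rw [stepA_eq]
      have e1 : pvGet2 matrix (i-1) (1+(kj:Int)) = (matrix.getD (i.toNat - 1) []).getD (1+kj) 0 := by
        rw [pvGet2_cast matrix (i-1) (1+(kj:Int)) (by omega) (by omega)]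
        have h1 : (i-1).toNat = i.toNat - 1 := by omega
        have h2 : (1+(kj:Int)).toNat = 1+kj := by omega
        rw [h1, h2]
      have e2 : pvGet2 matrix i ((1+(kj:Int))-1) = (matrix.getD i.toNat []).getD kj 0 := by
        rw [pvGet2_cast matrix i ((1+(kj:Int))-1) (by omega) (by omega)]
        have h2 : ((1+(kj:Int))-1).toNat = kj := by omega
        rw [h2]
      have e3 : pvGet2 matrix i (1+(kj:Int)) = (matrix.getD i.toNat []).getD (1+kj) 0 := by
        rw [pvGet2_cast matrix i (1+(kj:Int)) (by omega) (by omega)]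
        have h2 : (1+(kj:Int)).toNat = 1+kj := by omega
        rw [h2]
      have e4 : pvGet2 matrix i ((1+(kj:Int))+1) = (matrix.getD i.toNat []).getD (2+kj) 0 := by
        rw [pvGet2_cast matrix i ((1+(kj:Int))+1) (by omega) (by omega)]
        have h2 : ((1+(kj:Int))+1).toNat = 2+kj := by omega
        rw [h2]
      have e5 : pvGet2 matrix (i+1) (1+(kj:Int)) = (matrix.getD (i.toNat + 1) []).getD (1+kj) 0 := by
        rw [pvGet2_cast matrix (i+1) (1+(kj:Int)) (by omega) (by omega)]
        have h1 : (i+1).toNat = i.toNat + 1 := by omega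
        have h2 : (1+(kj:Int)).toNat = 1+kj := by omega
        rw [h1, h2]
      rw [e1, e2, e3, e4, e5]
  rw [PySem.List.pyRange_one 1 (n+1), show n+1-1 = n from by ring, List.foldl_map]
  rw [PySem.List.foldl_congr_mem _ _
    (fun (tot : Int) (ki : Nat) => tot +
      ((List.range m.toNat).map (fun kj =>
        pvCell ((matrix.getD ki []).getD (1+kj) 0) ((matrix.getD (1+ki) []).getD kj 0)
               ((matrix.getD (1+ki) []).getD (1+kj) 0) ((matrix.getD (1+ki) []).getD (2+kj) 0)
               ((matrix.getD (2+ki) []).getD (1+kj) 0))).sum) 0 ?_]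
  · rw [PySem.List.foldl_add]
    simp
  · intro tot ki _
    simp only
    rw [hinner tot (1+(ki:Int)) (by omega)]
    have h1 : (1+(ki:Int)).toNat - 1 = ki := by omega
    have h2 : (1+(ki:Int)).toNat = 1+ki := by omega
    have h3 : (1+(ki:Int)).toNat + 1 = 2+ki := by omega
    rw [h1, h3, h2]

-- ===== B-side lemmas =====

-- list-sum / Finset-sum bridge
theorem pv_list_finset (n : ℕ) (f : ℕ → Int) :
    ((List.range n).map f).sum = ∑ k ∈ Finset.range n, f k := by
  induction n with
  | zero => simp
  | succ n ih => rw [List.range_succ, Finset.sum_range_succ, List.map_append, List.sum_append, ih]; simp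

-- a window of a list as a map over range
theorem pv_window {α : Type} (l : List α) (a M : ℕ) (d : α) (h : a + M ≤ l.length) :
    (l.drop a).take M = (List.range M).map (fun k => l.getD (a+k) d) := by
  apply List.ext_getElem
  · rw [List.length_take, List.length_drop, List.length_map, List.length_range]
    omega
  · intro i h1 h2
    have hi : i < M := by
      rw [List.length_take, List.length_drop] at h1
      omega
    simp only [List.getElem_take, List.getElem_drop, List.getElem_map, List.getElem_range]
    rw [List.getD_eq_getElem?_getD, List.getElem?_eq_getElem (show a + i < l.length by omega), Option.getD_some]

theorem pv_sum_range_add (P : ℕ → Int) (a M : ℕ) (hlo : ∀ j, j < a → P j = 0) :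
    ∑ j ∈ Finset.range (a+M), P j = ∑ k ∈ Finset.range M, P (a + k) := by
  induction M with
  | zero => simpa using Finset.sum_eq_zero (fun x hx => hlo x (by simpa using hx))
  | succ M ih =>
    rw [show a + (M+1) = (a+M)+1 by omega, Finset.sum_range_succ, Finset.sum_range_succ, ih]

-- a sum over a larger range collapses to its nonzero window
theorem pv_window_sum (P : ℕ → Int) (a M T : ℕ) (hT : a + M ≤ T)
    (hlo : ∀ j, j < a → P j = 0) (hhi : ∀ j, a + M ≤ j → P j = 0) :
    ∑ j ∈ Finset.range T, P j = ∑ k ∈ Finset.range M, P (a + k) := by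
  have hsub : Finset.range (a+M) ⊆ Finset.range T := by
    intro x hx
    rw [Finset.mem_range] at *
    omega
  have h1 : ∑ j ∈ Finset.range T, P j = ∑ j ∈ Finset.range (a+M), P j := by
    symm
    apply Finset.sum_subset hsub
    intro x _ hx2
    exact hhi x (by simpa using hx2)
  rw [h1, pv_sum_range_add P a M hlo]

-- Python's list.count as a 0/1 sum
theorem pv_count (l : List Int) (v : Int) :
    ((l.count v : ℕ) : Int) = (l.map (fun x => if x = v then (1:Int) else 0)).sum := by
  induction l with
  | nil => simp
  | cons a l ih =>
    by_cases h : a = v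
    · simp [h, ← ih]
      omega
    · simp [h, ← ih]

-- the per-direction term of B's blocked pass
def pvT (matrix : List (List Int)) (n m : Int) (i j di dj : Int) : Int :=
  if 1 ≤ i + di ∧ i + di ≤ n ∧ 1 ≤ j + dj ∧ j + dj ≤ m ∧ pvGet2 matrix (i+di) (j+dj) = 1
  then 1 else 0

def pvF (matrix : List (List Int)) (n m : Int) (i j : Int) : Int :=
  if pvGet2 matrix i j ≠ 0 then
    pvT matrix n m i j (-1) 0 + pvT matrix n m i j 1 0
      + pvT matrix n m i j 0 (-1) + pvT matrix n m i j 0 1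
  else 0

theorem pvF_step (matrix : List (List Int)) (n m i j acc : Int) :
    (if pvGet2 matrix i j ≠ 0 then
        ([((-1:Int),(0:Int)),(1,0),(0,-1),(0,1)]).foldl (fun acc p =>
          if 1 ≤ i + p.1 ∧ i + p.1 ≤ n ∧ 1 ≤ j + p.2 ∧ j + p.2 ≤ m ∧ pvGet2 matrix (i+p.1) (j+p.2) = 1
          then acc + 1 else acc) acc
      else acc) = acc + pvF matrix n m i j := by
  unfold pvF pvT
  simp only [List.foldl]
  split_ifs <;> ring

-- Nat-guard forms of the four direction terms
def pvB1 (matrix : List (List Int)) (n m : Int) (ki kj : ℕ) : Int :=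
  if pvG matrix ki kj ≠ 0 ∧ 2 ≤ ki ∧ (ki:Int) ≤ n+1 ∧ 1 ≤ kj ∧ (kj:Int) ≤ m ∧ pvG matrix (ki-1) kj = 1 then 1 else 0
def pvB2 (matrix : List (List Int)) (n m : Int) (ki kj : ℕ) : Int :=
  if pvG matrix ki kj ≠ 0 ∧ ((ki:Int)+1) ≤ n ∧ 1 ≤ kj ∧ (kj:Int) ≤ m ∧ pvG matrix (ki+1) kj = 1 then 1 else 0
def pvB3 (matrix : List (List Int)) (n m : Int) (ki kj : ℕ) : Int :=
  if pvG matrix ki kj ≠ 0 ∧ 1 ≤ ki ∧ (ki:Int) ≤ n ∧ 2 ≤ kj ∧ (kj:Int) ≤ m+1 ∧ pvG matrix ki (kj-1) = 1 then 1 else 0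
def pvB4 (matrix : List (List Int)) (n m : Int) (ki kj : ℕ) : Int :=
  if pvG matrix ki kj ≠ 0 ∧ 1 ≤ ki ∧ (ki:Int) ≤ n ∧ ((kj:Int)+1) ≤ m ∧ pvG matrix ki (kj+1) = 1 then 1 else 0

theorem pvT1_eq (matrix : List (List Int)) (n m : Int) (ki kj : ℕ) :
    pvT matrix n m (ki:Int) (kj:Int) (-1) 0
      = if 2 ≤ ki ∧ (ki:Int) ≤ n+1 ∧ 1 ≤ kj ∧ (kj:Int) ≤ m ∧ pvG matrix (ki-1) kj = 1 then 1 else 0 := by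
  unfold pvT
  by_cases h2 : 2 ≤ ki
  · have e : pvGet2 matrix ((ki:Int) + -1) ((kj:Int) + 0) = pvG matrix (ki-1) kj := by
      rw [pvGet2_cast matrix _ _ (by omega) (by omega)]
      have t1 : ((ki:Int) + -1).toNat = ki - 1 := by omega
      have t2 : ((kj:Int) + (0:Int)).toNat = kj := by omega
      rw [t1, t2]; rfl
    rw [e]
    exact if_congr ⟨fun ⟨a,b,c,d,ev⟩ => ⟨by omega, by omega, by omega, by omega, ev⟩,
                    fun ⟨a,b,c,d,ev⟩ => ⟨by omega, by omega, by omega, by omega, ev⟩⟩ rfl rfl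
  · rw [if_neg, if_neg]
    · intro hcon; exact h2 hcon.1
    · intro hcon; obtain ⟨h1, -⟩ := hcon; omega

theorem pvT2_eq (matrix : List (List Int)) (n m : Int) (ki kj : ℕ) :
    pvT matrix n m (ki:Int) (kj:Int) 1 0
      = if ((ki:Int)+1) ≤ n ∧ 1 ≤ kj ∧ (kj:Int) ≤ m ∧ pvG matrix (ki+1) kj = 1 then 1 else 0 := by
  unfold pvT
  have e : pvGet2 matrix ((ki:Int) + 1) ((kj:Int) + 0) = pvG matrix (ki+1) kj := by
    rw [pvGet2_cast matrix _ _ (by omega) (by omega)]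
    have t1 : ((ki:Int) + 1).toNat = ki + 1 := by omega
    have t2 : ((kj:Int) + (0:Int)).toNat = kj := by omega
    rw [t1, t2]; rfl
  rw [e]
  exact if_congr ⟨fun ⟨a,b,c,d,ev⟩ => ⟨by omega, by omega, by omega, ev⟩,
                  fun ⟨b,c,d,ev⟩ => ⟨by omega, by omega, by omega, by omega, ev⟩⟩ rfl rfl

theorem pvT3_eq (matrix : List (List Int)) (n m : Int) (ki kj : ℕ) :
    pvT matrix n m (ki:Int) (kj:Int) 0 (-1)
      = if 1 ≤ ki ∧ (ki:Int) ≤ n ∧ 2 ≤ kj ∧ (kj:Int) ≤ m+1 ∧ pvG matrix ki (kj-1) = 1 then 1 else 0 := by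
  unfold pvT
  by_cases h2 : 2 ≤ kj
  · have e : pvGet2 matrix ((ki:Int) + 0) ((kj:Int) + -1) = pvG matrix ki (kj-1) := by
      rw [pvGet2_cast matrix _ _ (by omega) (by omega)]
      have t1 : ((ki:Int) + (0:Int)).toNat = ki := by omega
      have t2 : ((kj:Int) + -1).toNat = kj - 1 := by omega
      rw [t1, t2]; rfl
    rw [e]
    exact if_congr ⟨fun ⟨a,b,c,d,ev⟩ => ⟨by omega, by omega, by omega, by omega, ev⟩,
                    fun ⟨a,b,c,d,ev⟩ => ⟨by omega, by omega, by omega, by omega, ev⟩⟩ rfl rfl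
  · rw [if_neg, if_neg]
    · intro hcon; exact h2 hcon.2.2.1
    · intro hcon; obtain ⟨-, -, h1, -⟩ := hcon; omega

theorem pvT4_eq (matrix : List (List Int)) (n m : Int) (ki kj : ℕ) :
    pvT matrix n m (ki:Int) (kj:Int) 0 1
      = if 1 ≤ ki ∧ (ki:Int) ≤ n ∧ ((kj:Int)+1) ≤ m ∧ pvG matrix ki (kj+1) = 1 then 1 else 0 := by
  unfold pvT
  have e : pvGet2 matrix ((ki:Int) + 0) ((kj:Int) + 1) = pvG matrix ki (kj+1) := by
    rw [pvGet2_cast matrix _ _ (by omega) (by omega)]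
    have t1 : ((ki:Int) + (0:Int)).toNat = ki := by omega
    have t2 : ((kj:Int) + 1).toNat = kj + 1 := by omega
    rw [t1, t2]; rfl
  rw [e]
  exact if_congr ⟨fun ⟨a,b,c,d,ev⟩ => ⟨by omega, by omega, by omega, ev⟩,
                  fun ⟨a,b,d,ev⟩ => ⟨by omega, by omega, by omega, by omega, ev⟩⟩ rfl rfl

theorem pvF_nat (matrix : List (List Int)) (n m : Int) (ki kj : ℕ) :
    pvF matrix n m (ki:Int) (kj:Int)
      = pvB1 matrix n m ki kj + pvB2 matrix n m ki kj + pvB3 matrix n m ki kj + pvB4 matrix n m ki kj := by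
  unfold pvF pvB1 pvB2 pvB3 pvB4
  rw [pvT1_eq, pvT2_eq, pvT3_eq, pvT4_eq]
  have ec : pvGet2 matrix (ki:Int) (kj:Int) = pvG matrix ki kj := by
    rw [pvGet2_cast matrix _ _ (by omega) (by omega)]
    have t1 : ((ki:Int)).toNat = ki := by omega
    have t2 : ((kj:Int)).toNat = kj := by omega
    rw [t1, t2]; rfl
  rw [ec]
  by_cases hz : pvG matrix ki kj ≠ 0
  · rw [if_pos hz]
    congr 1
    · congr 1
      · congr 1
        · exact if_congr ⟨fun h => ⟨hz, h⟩, fun h => h.2⟩ rfl rfl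
        · exact if_congr ⟨fun h => ⟨hz, h⟩, fun h => h.2⟩ rfl rfl
      · exact if_congr ⟨fun h => ⟨hz, h⟩, fun h => h.2⟩ rfl rfl
    · exact if_congr ⟨fun h => ⟨hz, h⟩, fun h => h.2⟩ rfl rfl
  · rw [if_neg hz]
    rw [not_not] at hz
    rw [if_neg (fun h => h.1 hz), if_neg (fun h => h.1 hz), if_neg (fun h => h.1 hz), if_neg (fun h => h.1 hz)]
    norm_num

-- window collapse for each direction
theorem sum_B1 (matrix : List (List Int)) (n m : Int) (hn : 1 ≤ n) (hm : 1 ≤ m) :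
    ∑ i ∈ Finset.range (n.toNat+2), ∑ j ∈ Finset.range (m.toNat+2), pvB1 matrix n m i j
      = ∑ ki ∈ Finset.range n.toNat, ∑ kj ∈ Finset.range m.toNat,
          (if pvG matrix (2+ki) (1+kj) ≠ 0 ∧ pvG matrix (1+ki) (1+kj) = 1 then (1:Int) else 0) := by
  rw [pv_window_sum _ 2 n.toNat (n.toNat+2) (by omega)
    (fun i hi => Finset.sum_eq_zero (fun j _ => by
      unfold pvB1; exact if_neg (fun h => by omega)))
    (fun i hi => Finset.sum_eq_zero (fun j _ => by
      unfold pvB1; exact if_neg (fun h => by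
        have := h.2.2.1; omega)))]
  refine Finset.sum_congr rfl (fun ki hki => ?_)
  rw [pv_window_sum (fun j => pvB1 matrix n m (2+ki) j) 1 m.toNat (m.toNat+2) (by omega)
    (fun j hj => by unfold pvB1; exact if_neg (fun h => by omega))
    (fun j hj => by unfold pvB1; exact if_neg (fun h => by
      have := h.2.2.2.2.1; omega))]
  refine Finset.sum_congr rfl (fun kj hkj => ?_)
  rw [Finset.mem_range] at hki hkj
  unfold pvB1
  have t : (2 + ki) - 1 = 1 + ki := by omega
  rw [t]
  exact if_congr
    ⟨fun ⟨hz,_,_,_,_,hv⟩ => ⟨hz, hv⟩,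
     fun ⟨hz, hv⟩ => ⟨hz, by omega, by omega, by omega, by omega, hv⟩⟩ rfl rfl

theorem sum_B2 (matrix : List (List Int)) (n m : Int) (hn : 1 ≤ n) (hm : 1 ≤ m) :
    ∑ i ∈ Finset.range (n.toNat+2), ∑ j ∈ Finset.range (m.toNat+2), pvB2 matrix n m i j
      = ∑ ki ∈ Finset.range n.toNat, ∑ kj ∈ Finset.range m.toNat,
          (if pvG matrix ki (1+kj) ≠ 0 ∧ pvG matrix (1+ki) (1+kj) = 1 then (1:Int) else 0) := by
  rw [pv_window_sum _ 0 n.toNat (n.toNat+2) (by omega)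
    (fun i hi => by omega)
    (fun i hi => Finset.sum_eq_zero (fun j _ => by
      unfold pvB2; exact if_neg (fun h => by
        have := h.2.1; omega)))]
  refine Finset.sum_congr rfl (fun ki hki => ?_)
  rw [pv_window_sum (fun j => pvB2 matrix n m (0+ki) j) 1 m.toNat (m.toNat+2) (by omega)
    (fun j hj => by unfold pvB2; exact if_neg (fun h => by omega))
    (fun j hj => by unfold pvB2; exact if_neg (fun h => by
      have := h.2.2.2.1; omega))]
  refine Finset.sum_congr rfl (fun kj hkj => ?_)
  rw [Finset.mem_range] at hki hkj
  unfold pvB2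
  have t : (0 + ki) = ki := by omega
  rw [t]
  have t2 : ki + 1 = 1 + ki := by omega
  rw [t2]
  exact if_congr
    ⟨fun ⟨hz,_,_,_,hv⟩ => ⟨hz, hv⟩,
     fun ⟨hz, hv⟩ => ⟨hz, by omega, by omega, by omega, hv⟩⟩ rfl rfl

theorem sum_B3 (matrix : List (List Int)) (n m : Int) (hn : 1 ≤ n) (hm : 1 ≤ m) :
    ∑ i ∈ Finset.range (n.toNat+2), ∑ j ∈ Finset.range (m.toNat+2), pvB3 matrix n m i j
      = ∑ ki ∈ Finset.range n.toNat, ∑ kj ∈ Finset.range m.toNat,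
          (if pvG matrix (1+ki) (2+kj) ≠ 0 ∧ pvG matrix (1+ki) (1+kj) = 1 then (1:Int) else 0) := by
  rw [pv_window_sum _ 1 n.toNat (n.toNat+2) (by omega)
    (fun i hi => Finset.sum_eq_zero (fun j _ => by
      unfold pvB3; exact if_neg (fun h => by omega)))
    (fun i hi => Finset.sum_eq_zero (fun j _ => by
      unfold pvB3; exact if_neg (fun h => by
        have := h.2.2.1; omega)))]
  refine Finset.sum_congr rfl (fun ki hki => ?_)
  rw [pv_window_sum (fun j => pvB3 matrix n m (1+ki) j) 2 m.toNat (m.toNat+2) (by omega)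
    (fun j hj => by unfold pvB3; exact if_neg (fun h => by omega))
    (fun j hj => by unfold pvB3; exact if_neg (fun h => by
      have := h.2.2.2.2.1; omega))]
  refine Finset.sum_congr rfl (fun kj hkj => ?_)
  rw [Finset.mem_range] at hki hkj
  unfold pvB3
  have t : (2 + kj) - 1 = 1 + kj := by omega
  rw [t]
  exact if_congr
    ⟨fun ⟨hz,_,_,_,_,hv⟩ => ⟨hz, hv⟩,
     fun ⟨hz, hv⟩ => ⟨hz, by omega, by omega, by omega, by omega, hv⟩⟩ rfl rfl

theorem sum_B4 (matrix : List (List Int)) (n m : Int) (hn : 1 ≤ n) (hm : 1 ≤ m) :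
    ∑ i ∈ Finset.range (n.toNat+2), ∑ j ∈ Finset.range (m.toNat+2), pvB4 matrix n m i j
      = ∑ ki ∈ Finset.range n.toNat, ∑ kj ∈ Finset.range m.toNat,
          (if pvG matrix (1+ki) kj ≠ 0 ∧ pvG matrix (1+ki) (1+kj) = 1 then (1:Int) else 0) := by
  rw [pv_window_sum _ 1 n.toNat (n.toNat+2) (by omega)
    (fun i hi => Finset.sum_eq_zero (fun j _ => by
      unfold pvB4; exact if_neg (fun h => by omega)))
    (fun i hi => Finset.sum_eq_zero (fun j _ => by
      unfold pvB4; exact if_neg (fun h => by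
        have := h.2.2.1; omega)))]
  refine Finset.sum_congr rfl (fun ki hki => ?_)
  rw [pv_window_sum (fun j => pvB4 matrix n m (1+ki) j) 0 m.toNat (m.toNat+2) (by omega)
    (fun j hj => by omega)
    (fun j hj => by unfold pvB4; exact if_neg (fun h => by
      have := h.2.2.2.1; omega))]
  refine Finset.sum_congr rfl (fun kj hkj => ?_)
  rw [Finset.mem_range] at hki hkj
  unfold pvB4
  have t : (0 + kj) = kj := by omega
  rw [t]
  have t2 : kj + 1 = 1 + kj := by omega
  rw [t2]
  exact if_congr
    ⟨fun ⟨hz,_,_,_,hv⟩ => ⟨hz, hv⟩,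
     fun ⟨hz, hv⟩ => ⟨hz, by omega, by omega, by omega, hv⟩⟩ rfl rfl

-- the per-cell arithmetic identity behind 4*ones - blocked
theorem pv_cell_arith (u l c r d : Int) :
    pvCell u l c r d
      = 4 * (if c = 1 then (1:Int) else 0)
        - ((if d ≠ 0 ∧ c = 1 then (1:Int) else 0) + (if u ≠ 0 ∧ c = 1 then (1:Int) else 0)
           + (if r ≠ 0 ∧ c = 1 then (1:Int) else 0) + (if l ≠ 0 ∧ c = 1 then (1:Int) else 0)) := by
  unfold pvCell
  by_cases hc : c = 1 <;> by_cases hu : u = 0 <;> by_cases hl : l = 0 <;>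
    by_cases hr : r = 0 <;> by_cases hd : d = 0 <;> simp [hc, hu, hl, hr, hd]

theorem hrow_of_pre (matrix : List (List Int)) (n m : Int) (hn : 1 ≤ n) (hm : 1 ≤ m)
    (hlen : n + 2 ≤ (matrix.length : Int))
    (hrows : ∀ row ∈ matrix.take (n+2).toNat, m + 2 ≤ (row.length : Int)) :
    ∀ k : Nat, k < n.toNat + 2 → m.toNat + 2 ≤ (matrix.getD k []).length := by
  intro k hk
  have hkl : k < matrix.length := by omega
  have htk : k < (matrix.take (n+2).toNat).length := by
    simp [List.length_take]
    omega
  have hmem : matrix.getD k [] ∈ matrix.take (n+2).toNat := by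
    rw [List.getD_eq_getElem?_getD, List.getElem?_eq_getElem hkl]
    have heq : (matrix.take (n+2).toNat)[k]'htk = matrix[k] := List.getElem_take
    exact heq ▸ List.getElem_mem htk
  have := hrows _ hmem
  omega

theorem ones_eq (matrix : List (List Int)) (n m : Int) (hn : 1 ≤ n) (hm : 1 ≤ m)
    (hlen : n + 2 ≤ (matrix.length : Int))
    (hrows : ∀ row ∈ matrix.take (n+2).toNat, m + 2 ≤ (row.length : Int)) :
    ((PySem.List.slice matrix (some 1) (some (n+1))).map
        (fun row => ((PySem.List.count (PySem.List.slice row (some 1) (some (m+1))) (1:Int) : ℕ) : Int))).sum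
      = ∑ ki ∈ Finset.range n.toNat, ∑ kj ∈ Finset.range m.toNat,
          (if pvG matrix (1+ki) (1+kj) = 1 then (1:Int) else 0) := by
  have hrow := hrow_of_pre matrix n m hn hm hlen hrows
  rw [PySem.List.slice_toNat matrix (by omega : (0:Int) ≤ 1) (by omega : (0:Int) ≤ n+1)]
  simp only [Int.toNat_one]
  rw [show (n+1).toNat - 1 = n.toNat from by omega]
  rw [pv_window matrix 1 n.toNat [] (by omega)]
  rw [List.map_map, pv_list_finset]
  refine Finset.sum_congr rfl (fun ki hki => ?_)
  rw [Finset.mem_range] at hki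
  simp only [Function.comp]
  rw [PySem.List.slice_toNat _ (by omega : (0:Int) ≤ 1) (by omega : (0:Int) ≤ m+1)]
  simp only [Int.toNat_one]
  rw [show (m+1).toNat - 1 = m.toNat from by omega]
  rw [pv_window (matrix.getD (1+ki) []) 1 m.toNat 0 (by have := hrow (1+ki) (by omega); omega)]
  rw [PySem.List.count_eq, pv_count, List.map_map, pv_list_finset]
  exact Finset.sum_congr rfl (fun kj _ => rfl)

theorem blocked_eq (matrix : List (List Int)) (n m : Int) (hn : 1 ≤ n) (hm : 1 ≤ m) :
    (PySem.List.pyRange 0 (n+2) 1).foldl (fun acc i =>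
        (PySem.List.pyRange 0 (m+2) 1).foldl (fun acc j =>
          if pvGet2 matrix i j ≠ 0 then
            ([((-1:Int),(0:Int)),(1,0),(0,-1),(0,1)]).foldl (fun acc p =>
              if 1 ≤ i + p.1 ∧ i + p.1 ≤ n ∧ 1 ≤ j + p.2 ∧ j + p.2 ≤ m ∧ pvGet2 matrix (i+p.1) (j+p.2) = 1
              then acc + 1 else acc) acc
          else acc) acc) 0
      = ∑ i ∈ Finset.range (n.toNat+2), ∑ j ∈ Finset.range (m.toNat+2), pvF matrix n m (i:Int) (j:Int) := by
  have hm2 : (m+2-0).toNat = m.toNat + 2 := by omega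
  have hn2 : (n+2-0).toNat = n.toNat + 2 := by omega
  have hinner : ∀ (acc : Int) (i : Int),
      (PySem.List.pyRange 0 (m+2) 1).foldl (fun acc j =>
        if pvGet2 matrix i j ≠ 0 then
          ([((-1:Int),(0:Int)),(1,0),(0,-1),(0,1)]).foldl (fun acc p =>
            if 1 ≤ i + p.1 ∧ i + p.1 ≤ n ∧ 1 ≤ j + p.2 ∧ j + p.2 ≤ m ∧ pvGet2 matrix (i+p.1) (j+p.2) = 1
            then acc + 1 else acc) acc
        else acc) acc
      = acc + ∑ j ∈ Finset.range (m.toNat+2), pvF matrix n m i (j:Int) := by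
    intro acc i
    rw [PySem.List.pyRange_one 0 (m+2), hm2, List.foldl_map]
    rw [PySem.List.foldl_congr_mem _ _
      (fun (acc : Int) (k : ℕ) => acc + pvF matrix n m i ((k:Int))) acc ?_]
    · rw [PySem.List.foldl_add]
      rw [pv_list_finset]
    · intro acc k _
      simp only [zero_add]
      exact pvF_step matrix n m i (k:Int) acc
  rw [PySem.List.pyRange_one 0 (n+2), hn2, List.foldl_map]
  rw [PySem.List.foldl_congr_mem _ _
    (fun (acc : Int) (k : ℕ) => acc + ∑ j ∈ Finset.range (m.toNat+2), pvF matrix n m ((k:Int)) (j:Int)) 0 ?_]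
  · rw [PySem.List.foldl_add, pv_list_finset]
    simp
  · intro acc k _
    simp only [zero_add]
    exact hinner acc (k:Int)

-- pvSum as a Finset double sum
theorem pvSum_finset (matrix : List (List Int)) (N M : ℕ) :
    pvSum matrix N M
      = ∑ ki ∈ Finset.range N, ∑ kj ∈ Finset.range M,
          pvCell (pvG matrix ki (1+kj)) (pvG matrix (1+ki) kj) (pvG matrix (1+ki) (1+kj))
                 (pvG matrix (1+ki) (2+kj)) (pvG matrix (2+ki) (1+kj)) := by
  unfold pvSum
  rw [pv_list_finset]
  exact Finset.sum_congr rfl (fun ki _ => by rw [pv_list_finset]; rfl)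

theorem B_eq (matrix : List (List Int)) (n m : Int) (hn : 1 ≤ n) (hm : 1 ≤ m)
    (hlen : n + 2 ≤ (matrix.length : Int))
    (hrows : ∀ row ∈ matrix.take (n+2).toNat, m + 2 ≤ (row.length : Int)) :
    solution_alt matrix n m = pvSum matrix n.toNat m.toNat := by
  unfold solution_alt
  rw [if_neg (by omega)]
  rw [ones_eq matrix n m hn hm hlen hrows, blocked_eq matrix n m hn hm]
  have hsplit : ∑ i ∈ Finset.range (n.toNat+2), ∑ j ∈ Finset.range (m.toNat+2), pvF matrix n m (i:Int) (j:Int)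
      = (∑ i ∈ Finset.range (n.toNat+2), ∑ j ∈ Finset.range (m.toNat+2), pvB1 matrix n m i j)
        + (∑ i ∈ Finset.range (n.toNat+2), ∑ j ∈ Finset.range (m.toNat+2), pvB2 matrix n m i j)
        + (∑ i ∈ Finset.range (n.toNat+2), ∑ j ∈ Finset.range (m.toNat+2), pvB3 matrix n m i j)
        + (∑ i ∈ Finset.range (n.toNat+2), ∑ j ∈ Finset.range (m.toNat+2), pvB4 matrix n m i j) := by
    rw [← Finset.sum_add_distrib, ← Finset.sum_add_distrib, ← Finset.sum_add_distrib]
    refine Finset.sum_congr rfl (fun i _ => ?_)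
    rw [← Finset.sum_add_distrib, ← Finset.sum_add_distrib, ← Finset.sum_add_distrib]
    exact Finset.sum_congr rfl (fun j _ => pvF_nat matrix n m i j)
  rw [hsplit, sum_B1 matrix n m hn hm, sum_B2 matrix n m hn hm, sum_B3 matrix n m hn hm,
     sum_B4 matrix n m hn hm, pvSum_finset]
  rw [Finset.mul_sum]
  rw [← Finset.sum_add_distrib, ← Finset.sum_add_distrib, ← Finset.sum_add_distrib, ← Finset.sum_sub_distrib]
  refine Finset.sum_congr rfl (fun ki _ => ?_)
  rw [Finset.mul_sum]
  rw [← Finset.sum_add_distrib, ← Finset.sum_add_distrib, ← Finset.sum_add_distrib, ← Finset.sum_sub_distrib]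
  refine Finset.sum_congr rfl (fun kj _ => ?_)
  exact (pv_cell_arith _ _ _ _ _).symm

-- ===== VERDICT (by name: the statement is the Claim_ definition above) =====
theorem solution_spec : Claim_equal_solution := by
  intro matrix n m _ hpre
  unfold Spec_solution
  by_cases hn : n < 1
  · have hA : solution matrix n m = 0 := by
      unfold solution
      rw [PySem.List.pyRange_one_eq_nil (by omega : n+1 ≤ 1)]
      rfl
    have hB : solution_alt matrix n m = 0 := by
      unfold solution_alt
      rw [if_pos (Or.inl hn)]
    rw [hA, hB]
  · by_cases hm : m < 1
    · have hA : solution matrix n m = 0 := by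
        unfold solution
        rw [PySem.List.pyRange_one_eq_nil (show m+1 ≤ 1 by omega)]
        have : ∀ l tot, List.foldl (fun (tot : Int) (_ : Int) => List.foldl (fun tot _ => tot) tot ([] : List Int)) tot l = tot := by
          intro l
          induction l with
          | nil => intro tot; rfl
          | cons x xs ih => intro tot; simp only [List.foldl_cons, List.foldl_nil]; exact ih tot
        exact this _ 0
      have hB : solution_alt matrix n m = 0 := by
        unfold solution_alt
        rw [if_pos (Or.inr hm)]
      rw [hA, hB]
    · rcases hpre with h | h | ⟨hlen, hrows⟩
      · omega
      · omega
      · rw [A_eq, B_eq matrix n m (by omega) (by omega) hlen hrows]
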